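-- pv_equiv track=rewrite | github.com/Gland0rf/CatCoderSolutions | ParkGarage/Level2/index.py | get_max_waiting
-- ===== SOURCE A (Python) =====
-- def get_max_waiting(car_data, parking_plots):
--     current_cars = 0
--
--     waiting_list = 0
--     max_waiting_list = 0
--
--     for car in car_data:
--         if int(car) > 0:
--             current_cars += 1
--             if current_cars > parking_plots:
--                 waiting_list += 1
--                 if waiting_list > max_waiting_list:
--                     max_waiting_list = waiting_list
--         else:
--             if current_cars > parking_plots:
--                 waiting_list -= 1
--             current_cars -= 1
--
--     return max_waiting_list
-- ===== SOURCE B (Python) =====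
-- def get_max_waiting(car_data, parking_plots):
--     cur = 0
--     peak = 0
--     for car in car_data:
--         cur = cur + 1 if int(car) > 0 else cur - 1
--         if cur > peak:
--             peak = cur
--     return max(0, peak - parking_plots)
-- ===== Notes on version B (the rewrite author's own statement) =====
-- stated objective: simpler
-- what changed: B replaces the three-counter nested-branch waiting-list bookkeeping by one running occupancy counter with its peak, returning the closed form max(0, peak - parking_plots).
-- outside the precondition, e.g. on get_max_waiting([1], -2): A returns 1, B returns 3
import Mathlib
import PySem

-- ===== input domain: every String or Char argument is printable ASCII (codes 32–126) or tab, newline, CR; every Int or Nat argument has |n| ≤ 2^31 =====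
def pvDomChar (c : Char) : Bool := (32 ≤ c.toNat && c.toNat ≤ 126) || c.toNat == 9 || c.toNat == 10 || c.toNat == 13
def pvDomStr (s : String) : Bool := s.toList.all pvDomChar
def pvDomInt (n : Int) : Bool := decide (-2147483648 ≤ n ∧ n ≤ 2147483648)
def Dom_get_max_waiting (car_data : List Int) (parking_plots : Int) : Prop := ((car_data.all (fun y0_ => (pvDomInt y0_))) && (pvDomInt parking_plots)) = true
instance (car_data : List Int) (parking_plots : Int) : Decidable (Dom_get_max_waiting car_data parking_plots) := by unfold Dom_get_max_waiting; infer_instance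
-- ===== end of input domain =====

-- B tracks peak occupancy in one pass and returns max(0, peak - parking_plots)
-- instead of A's inline waiting-list bookkeeping; return values only, no mutation.

-- ===== PORT A =====
-- state: (current_cars, waiting_list, max_waiting_list), updated exactly as A's branches do
def stepA (parking_plots : Int) (st : Int × Int × Int) (car : Int) : Int × Int × Int :=
  if 0 < car then
    let cur := st.1 + 1
    if parking_plots < cur then
      let w := st.2.1 + 1
      (cur, w, if st.2.2 < w then w else st.2.2)
    else (cur, st.2.1, st.2.2)
  else
    (st.1 - 1, if parking_plots < st.1 then st.2.1 - 1 else st.2.1, st.2.2)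

def get_max_waiting (car_data : List Int) (parking_plots : Int) : Int :=
  (car_data.foldl (stepA parking_plots) (0, 0, 0)).2.2

-- ===== PORT B =====
-- state: (cur, peak)
def stepB (st : Int × Int) (car : Int) : Int × Int :=
  let cur := if 0 < car then st.1 + 1 else st.1 - 1
  (cur, if st.2 < cur then cur else st.2)

def get_max_waiting_alt (car_data : List Int) (parking_plots : Int) : Int :=
  let s := car_data.foldl stepB (0, 0)
  max 0 (s.2 - parking_plots)

-- ===== PRECONDITION & SPEC =====
-- Pre_ restricts to the natural domain of a non-negative number of parking plots:
-- for negative parking_plots A's path-dependent waiting counter returns an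
-- accidental value no one would specify, and B's peak formula another.
def Pre_get_max_waiting (car_data : List Int) (parking_plots : Int) : Prop :=
  0 ≤ parking_plots
instance (car_data : List Int) (parking_plots : Int) : Decidable (Pre_get_max_waiting car_data parking_plots) := by unfold Pre_get_max_waiting; infer_instance

def pvWitness_get_max_waiting : List Int × Int := ([1, 1, -1, 1, 1, -1], 2)

def Spec_get_max_waiting (car_data : List Int) (parking_plots : Int) (out : Int) : Prop := out = get_max_waiting_alt car_data parking_plots
instance (car_data : List Int) (parking_plots : Int) (out : Int) : Decidable (Spec_get_max_waiting car_data parking_plots out) := by unfold Spec_get_max_waiting; infer_instance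

-- ===== CLAIM (what is proved, stated in full; the proofs are below) =====
def Claim_equal_get_max_waiting : Prop := ∀ (car_data : List Int) (parking_plots : Int), Dom_get_max_waiting car_data parking_plots → Pre_get_max_waiting car_data parking_plots → Spec_get_max_waiting car_data parking_plots (get_max_waiting car_data parking_plots)

-- ===== LEMMAS AND PROOFS =====

-- invariant: from any occupancy cur ≤ pk with 0 ≤ pk, A's waiting counter is
-- max 0 (cur - p) and its max-so-far is max 0 (pk - p)
theorem key (p : Int) : ∀ (l : List Int) (cur pk : Int), cur ≤ pk → 0 ≤ pk →
    (l.foldl (stepA p) (cur, max 0 (cur - p), max 0 (pk - p))).2.2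
      = max 0 ((l.foldl stepB (cur, pk)).2 - p) := by
  intro l
  induction l with
  | nil => intro cur pk _ _; simp
  | cons car rest ih =>
    intro cur pk h1 h2
    simp only [List.foldl_cons]
    by_cases hc : 0 < car
    · have hA : stepA p (cur, max 0 (cur - p), max 0 (pk - p)) car
          = (cur + 1, max 0 (cur + 1 - p), max 0 (max pk (cur + 1) - p)) := by
        simp only [stepA, hc, if_true]
        split_ifs <;> simp <;> omega
      have hB : stepB (cur, pk) car = (cur + 1, max pk (cur + 1)) := by
        simp only [stepB, hc, if_true]
        split_ifs <;> simp <;> omega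
      rw [hA, hB]
      exact ih _ _ (by omega) (by omega)
    · have hA : stepA p (cur, max 0 (cur - p), max 0 (pk - p)) car
          = (cur - 1, max 0 (cur - 1 - p), max 0 (pk - p)) := by
        simp only [stepA, hc, if_false]
        split_ifs <;> simp <;> omega
      have hB : stepB (cur, pk) car = (cur - 1, pk) := by
        simp only [stepB, hc, if_false]
        split_ifs <;> simp <;> omega
      rw [hA, hB]
      exact ih _ _ (by omega) h2

-- ===== VERDICT (by name: the statement is the Claim_ definition above) =====
theorem get_max_waiting_spec : Claim_equal_get_max_waiting := by
  intro car_data p _ hp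
  replace hp : 0 ≤ p := hp
  unfold Spec_get_max_waiting get_max_waiting get_max_waiting_alt
  have h0 : ((0 : Int), (0 : Int), (0 : Int)) = (0, max 0 (0 - p), max 0 (0 - p)) := by
    simp
    omega
  rw [h0, key p car_data 0 0 le_rfl le_rfl]
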